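-- pv_equiv track=rewrite | github.com/BlueMarginalist/MacroDashBoard | generate_html.py | NormalizeFreq
-- ===== SOURCE A (Python) =====
-- def NormalizeFreq(code: str) -> str:
--     fm = {
--         ("MONTHLY", "M"): "M",
--         ("QUARTERLY", "Q"): "Q",
--         ("WEEKLY", "W"): "W",
--         ("ANNUAL", "A", "Y"): "A",
--         ("DAILY", "D"): "D",
--     }
--     code_up = code.upper()
--     for keys, val in fm.items():
--         if code_up in keys:
--             return val
--     raise ValueError(f"Unsupported frequency: {code}")
-- ===== SOURCE B (Python) =====
-- _WORDS = {"M": "MONTHLY", "Q": "QUARTERLY", "W": "WEEKLY", "A": "ANNUAL", "D": "DAILY"}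
--
-- def NormalizeFreq(code: str) -> str:
--     cu = code.upper()
--     if cu == "Y":
--         return "A"
--     first = cu[:1]
--     if first in _WORDS and cu in (first, _WORDS[first]):
--         return first
--     raise ValueError(f"Unsupported frequency: {code}")
-- ===== Notes on version B (the rewrite author's own statement) =====
-- stated objective: alternative
-- what changed: B derives the canonical code from the first letter of the uppercased input (Y special-cased to A) and validates by comparing against the full word indexed by that letter, instead of scanning A's tuple-keyed alias table; the output is computed from the input, not looked up.
import Mathlib
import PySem

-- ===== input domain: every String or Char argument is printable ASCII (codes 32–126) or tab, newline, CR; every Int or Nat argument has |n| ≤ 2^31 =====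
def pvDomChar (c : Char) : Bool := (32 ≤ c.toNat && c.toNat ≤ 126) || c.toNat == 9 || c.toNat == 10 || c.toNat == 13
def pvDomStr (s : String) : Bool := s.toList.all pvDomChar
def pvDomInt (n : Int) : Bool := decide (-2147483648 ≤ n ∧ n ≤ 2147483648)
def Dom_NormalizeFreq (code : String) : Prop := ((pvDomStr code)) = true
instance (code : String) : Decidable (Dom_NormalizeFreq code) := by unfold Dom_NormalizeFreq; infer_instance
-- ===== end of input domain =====

-- B derives the canonical code from the first letter of the uppercased input (Y → A special case),
-- validating against the full word indexed by that letter, instead of scanning A's alias table (alternative).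
-- On unsupported codes both Pythons raise ValueError; those inputs are outside Pre_.

-- ===== PORT A =====
-- the dict of tuple-keys, in insertion order
def NormalizeFreqFm : List (List String × String) :=
  [(["MONTHLY", "M"], "M"),
   (["QUARTERLY", "Q"], "Q"),
   (["WEEKLY", "W"], "W"),
   (["ANNUAL", "A", "Y"], "A"),
   (["DAILY", "D"], "D")]

-- the for-loop over fm.items(); none = the final raise ValueError
def NormalizeFreqLoop (items : List (List String × String)) (codeUp : String) : Option String :=
  match items with
  | [] => none
  | (keys, val) :: rest =>
      if codeUp ∈ keys then some val else NormalizeFreqLoop rest codeUp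

def NormalizeFreq (code : String) : String :=
  (NormalizeFreqLoop NormalizeFreqFm (PySem.Str.upper code)).getD ""

-- ===== PORT B =====
-- first-letter → full word
def NormalizeFreqWords : PySem.Dict String String :=
  PySem.Dict.ofList
    [("M", "MONTHLY"), ("Q", "QUARTERLY"), ("W", "WEEKLY"), ("A", "ANNUAL"), ("D", "DAILY")]

def NormalizeFreq_alt (code : String) : String :=
  let cu := PySem.Str.upper code
  if cu = "Y" then "A"
  else
    let first := PySem.Str.slice cu none (some 1)   -- cu[:1]
    match NormalizeFreqWords.get? first with        -- first in _WORDS (and fetch its word)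
    | some w => if cu = first ∨ cu = w then first else ""   -- "" = the raise ValueError
    | none => ""

-- ===== PRECONDITION & SPEC =====
-- Pre_ excludes exactly the codes whose upper-case form is not a supported alias: there both Pythons raise ValueError.
def Pre_NormalizeFreq (code : String) : Prop :=
  PySem.Str.upper code ∈
    ["MONTHLY", "M", "QUARTERLY", "Q", "WEEKLY", "W", "ANNUAL", "A", "Y", "DAILY", "D"]
instance (code : String) : Decidable (Pre_NormalizeFreq code) := by unfold Pre_NormalizeFreq; infer_instance
def pvWitness_NormalizeFreq : String := "monthly"

def Spec_NormalizeFreq (code : String) (out : String) : Prop := out = NormalizeFreq_alt code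
instance (code : String) (out : String) : Decidable (Spec_NormalizeFreq code out) := by unfold Spec_NormalizeFreq; infer_instance

-- ===== CLAIM (what is proved, stated in full; the proofs are below) =====
def Claim_equal_NormalizeFreq : Prop := ∀ (code : String), Dom_NormalizeFreq code → Pre_NormalizeFreq code → Spec_NormalizeFreq code (NormalizeFreq code)

-- ===== LEMMAS AND PROOFS =====
theorem NormalizeFreq_eq_alt_of_upper (code : String) (u : String)
    (hu : u ∈ ["MONTHLY", "M", "QUARTERLY", "Q", "WEEKLY", "W", "ANNUAL", "A", "Y", "DAILY", "D"])
    (h : PySem.Str.upper code = u) :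
    NormalizeFreq code = NormalizeFreq_alt code := by
  unfold NormalizeFreq NormalizeFreq_alt
  rw [h]
  fin_cases hu <;> decide

-- ===== VERDICT (by name: the statement is the Claim_ definition above) =====
theorem NormalizeFreq_spec : Claim_equal_NormalizeFreq := by
  intro code _ hpre
  unfold Spec_NormalizeFreq
  exact NormalizeFreq_eq_alt_of_upper code _ hpre rfl
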